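-- pv_equiv track=rewrite | github.com/Jimbiscus/Python_Dump | abcmaths.py | cap_to_front
-- ===== SOURCE A (Python) =====
-- def cap_to_front(s):
--     upperList = []
--     lowerList = []
--     for i in s:
--         if i.isupper() == True:
--             upperList.append(i)
--         else:
--             lowerList.append(i)
--     upperWord = "".join(upperList)
--     lowerWord = "".join(lowerList)
--     result = upperWord + lowerWord
--     return result
-- ===== SOURCE B (Python) =====
-- def cap_to_front(s):
--     # Stable sort on a two-valued key: uppercase chars (key False) come first,
--     # everything else (key True) after, each group keeping its original order.
--     return "".join(sorted(s, key=lambda c: not c.isupper()))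
-- ===== Notes on version B (the rewrite author's own statement) =====
-- stated objective: idiomatic
-- what changed: Replaced the explicit two-accumulator partition loop with a one-line stable sort keyed on whether the character is non-uppercase, whose stability yields the same stable partition.
import Mathlib
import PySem

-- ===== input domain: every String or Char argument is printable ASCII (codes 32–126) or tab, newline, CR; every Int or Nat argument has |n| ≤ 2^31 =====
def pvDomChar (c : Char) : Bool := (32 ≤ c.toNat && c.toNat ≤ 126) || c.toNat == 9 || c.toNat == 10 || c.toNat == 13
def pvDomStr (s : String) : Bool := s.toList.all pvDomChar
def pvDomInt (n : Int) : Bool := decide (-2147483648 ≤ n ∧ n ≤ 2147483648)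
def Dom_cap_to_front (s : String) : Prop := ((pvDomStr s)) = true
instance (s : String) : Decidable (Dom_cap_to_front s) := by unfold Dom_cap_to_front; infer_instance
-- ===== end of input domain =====

-- ===== PORT A =====
-- B changes only the return value's construction; neither program mutates its argument.
-- One honest line: B replaces A's two-accumulator partition loop with a stable sort on the key "not isupper" (idiomatic; same result).
def cap_to_front (s : String) : String :=
  -- literal transliteration of A: one loop appending each char to upperList or lowerList,
  -- then join and concatenate (joins/concat of char lists rendered via String.ofList)
  let p := s.toList.foldl
    (fun (acc : List Char × List Char) i =>
      if PySem.Chars.isupper i = true then (acc.1 ++ [i], acc.2) else (acc.1, acc.2 ++ [i]))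
    ([], [])
  String.ofList (p.1 ++ p.2)

-- ===== PORT B =====
def capKey (c : Char) : Int := if PySem.Chars.isupper c then 0 else 1

def cap_to_front_alt (s : String) : String :=
  -- "".join(sorted(s, key=lambda c: not c.isupper())) — Python's bool key False<True rendered as Int 0<1
  String.ofList (PySem.List.sorted s.toList capKey false)

-- ===== PRECONDITION & SPEC =====
def Spec_cap_to_front (s : String) (out : String) : Prop := out = cap_to_front_alt s
instance (s : String) (out : String) : Decidable (Spec_cap_to_front s out) := by unfold Spec_cap_to_front; infer_instance

-- ===== CLAIM (what is proved, stated in full; the proofs are below) =====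
def Claim_equal_cap_to_front : Prop := ∀ (s : String), Dom_cap_to_front s → Spec_cap_to_front s (cap_to_front s)

-- ===== LEMMAS AND PROOFS =====

-- A's loop is the stable partition by isupper
theorem capA_foldl (xs us ls : List Char) :
    xs.foldl
      (fun (acc : List Char × List Char) i =>
        if PySem.Chars.isupper i = true then (acc.1 ++ [i], acc.2) else (acc.1, acc.2 ++ [i]))
      (us, ls)
    = (us ++ xs.filter (fun c => PySem.Chars.isupper c),
       ls ++ xs.filter (fun c => !PySem.Chars.isupper c)) := by
  induction xs generalizing us ls with
  | nil => simp
  | cons x xs ih =>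
    by_cases hx : PySem.Chars.isupper x = true
    · simp [List.foldl_cons, hx, ih]
    · simp [List.foldl_cons, hx, ih]

theorem capKey_vals (c : Char) : capKey c = 0 ∨ capKey c = 1 := by
  unfold capKey; split <;> simp

-- inserting an uppercase char lands right after the uppercase prefix
theorem insert_mid (x : Char) (us ls : List Char)
    (hx : capKey x = 0) (hus : ∀ u ∈ us, capKey u = 0) (hls : ∀ l ∈ ls, capKey l = 1) :
    PySem.List.insertBy (fun a b => decide (capKey a < capKey b)) x (us ++ ls)
      = (us ++ [x]) ++ ls := by
  induction us with
  | nil =>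
    cases ls with
    | nil => simp [PySem.List.insertBy]
    | cons l ls' =>
      have hl : capKey l = 1 := hls l (by simp)
      simp [PySem.List.insertBy, hx, hl]
  | cons u us' ih =>
    have hu : capKey u = 0 := hus u (by simp)
    have : PySem.List.insertBy (fun a b => decide (capKey a < capKey b)) x ((u :: us') ++ ls)
        = u :: PySem.List.insertBy (fun a b => decide (capKey a < capKey b)) x (us' ++ ls) := by
      simp [PySem.List.insertBy, hx, hu]
    rw [this, ih (fun u hu' => hus u (by simp [hu']))]
    simp

-- inserting a non-uppercase char lands at the very end
theorem insert_end (x : Char) (ys : List Char) (hx : capKey x = 1) :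
    PySem.List.insertBy (fun a b => decide (capKey a < capKey b)) x ys = ys ++ [x] := by
  apply PySem.List.insertBy_of_forall_not_before
  intro y _
  rcases capKey_vals y with h | h <;> simp [hx, h]

-- the insertion-sort loop with the two-valued key maintains the partition
theorem capB_foldl (xs us ls : List Char)
    (hus : ∀ u ∈ us, capKey u = 0) (hls : ∀ l ∈ ls, capKey l = 1) :
    xs.foldl (fun acc x => PySem.List.insertBy (fun a b => decide (capKey a < capKey b)) x acc)
        (us ++ ls)
    = (us ++ xs.filter (fun c => PySem.Chars.isupper c))
        ++ (ls ++ xs.filter (fun c => !PySem.Chars.isupper c)) := by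
  induction xs generalizing us ls with
  | nil => simp
  | cons x xs ih =>
    by_cases hx : PySem.Chars.isupper x = true
    · have hk : capKey x = 0 := by simp [capKey, hx]
      have hus' : ∀ u ∈ us ++ [x], capKey u = 0 := by
        intro u hu
        rcases List.mem_append.1 hu with h | h
        · exact hus u h
        · simp at h; simp [h, hk]
      rw [List.foldl_cons, insert_mid x us ls hk hus hls, ih (us ++ [x]) ls hus' hls]
      simp [hx]
    · have hk : capKey x = 1 := by simp [capKey, hx]
      have hls' : ∀ l ∈ ls ++ [x], capKey l = 1 := by
        intro l hl
        rcases List.mem_append.1 hl with h | h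
        · exact hls l h
        · simp at h; simp [h, hk]
      have hsplit : (us ++ ls) ++ [x] = us ++ (ls ++ [x]) := by simp
      rw [List.foldl_cons, insert_end x (us ++ ls) hk, hsplit, ih us (ls ++ [x]) hus hls']
      simp [hx]

-- ===== VERDICT (by name: the statement is the Claim_ definition above) =====
theorem cap_to_front_spec : Claim_equal_cap_to_front := by
  intro s _
  unfold Spec_cap_to_front cap_to_front cap_to_front_alt
  rw [PySem.List.sorted_eq_foldl_insertBy]
  have hB := capB_foldl s.toList [] [] (by simp) (by simp)
  simp only [List.nil_append] at hB
  rw [hB, capA_foldl]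
  simp
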